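-- pv_equiv track=rewrite | github.com/pypi-data/pypi-mirror-334 | packages/conviso-cli/conviso_cli-2.3.2rc0-py3-none-any.whl/convisoappsec/flowcli/iac/run.py | parse_code_snippet
-- ===== SOURCE A (Python) =====
-- def parse_code_snippet(code_snippet):
--     lines = code_snippet.split("\n")
--
--     cleaned_lines = []
--     for line in lines:
--         cleaned_line = line.split(": ", 1)[-1]
--         cleaned_lines.append(cleaned_line)
--
--     code_snippet = "\n".join(cleaned_lines)
--
--     return code_snippet
-- ===== SOURCE B (Python) =====
-- def parse_code_snippet(code_snippet):
--     # Single pass over the characters with a per-line buffer and a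
--     # "prefix already stripped" flag, instead of split/loop/join.
--     out = []
--     acc = []
--     stripped = False
--     i = 0
--     n = len(code_snippet)
--     while i < n:
--         c = code_snippet[i]
--         if c == "\n":
--             out.extend(acc)
--             out.append("\n")
--             acc = []
--             stripped = False
--             i += 1
--         elif not stripped and c == ":" and i + 1 < n and code_snippet[i + 1] == " ":
--             acc = []
--             stripped = True
--             i += 2
--         else:
--             acc.append(c)
--             i += 1
--     out.extend(acc)
--     return "".join(out)
-- ===== Notes on version B (the rewrite author's own statement) =====
-- stated objective: alternative
-- what changed: Replaces the split-into-lines, per-line prefix split and join pipeline with a single character-by-character state-machine pass that keeps a per-line buffer and a boolean flag recording whether the current line's prefix was already removed; no line list is materialised.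
import Mathlib
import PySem

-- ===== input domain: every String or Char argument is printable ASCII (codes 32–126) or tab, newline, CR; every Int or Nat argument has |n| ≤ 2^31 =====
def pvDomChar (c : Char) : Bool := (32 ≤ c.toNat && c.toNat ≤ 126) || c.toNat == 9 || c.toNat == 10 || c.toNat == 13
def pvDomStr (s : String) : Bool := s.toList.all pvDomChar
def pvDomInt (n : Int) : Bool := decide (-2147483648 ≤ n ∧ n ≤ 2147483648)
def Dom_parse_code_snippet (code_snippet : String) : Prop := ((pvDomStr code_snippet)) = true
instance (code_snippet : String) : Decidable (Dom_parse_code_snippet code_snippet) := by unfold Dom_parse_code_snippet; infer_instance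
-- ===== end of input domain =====

-- B replaces A's split-into-lines / per-line prefix split / join pipeline with a single
-- character-by-character state-machine pass (objective: alternative; same return value).

-- ===== PORT A =====
-- A: split at newlines; each line keeps only what follows its first colon-space; rejoin.
-- line.split(": ", 1) is never empty, so Python's [-1] never raises; the .getD [] is dead.
def parse_code_snippet (code_snippet : String) : String :=
  let lines := PySem.Chars.splitOn code_snippet.toList ['\n']
  let cleaned := lines.map
    (fun line => (PySem.List.pyGet? (PySem.Chars.splitOnMax line [':', ' '] 1) (-1)).getD [])
  String.mk (PySem.Chars.join ['\n'] cleaned)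

-- ===== PORT B =====
-- Source B's while loop: state = (remaining input, current-line buffer acc, stripped flag, output out).
def pvAltGo : List Char → List Char → Bool → List Char → List Char
  | [], acc, _, out => out ++ acc
  | c :: rest, acc, stripped, out =>
    if c = '\n' then pvAltGo rest [] false (out ++ acc ++ ['\n'])
    else if stripped = false ∧ c = ':' ∧ rest.head? = some ' ' then
      pvAltGo rest.tail [] true out
    else pvAltGo rest (acc ++ [c]) stripped out
termination_by s => s.length
decreasing_by all_goals (simp [List.length_tail]; try omega)

def parse_code_snippet_alt (code_snippet : String) : String :=
  String.mk (pvAltGo code_snippet.toList [] false [])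

-- ===== PRECONDITION & SPEC =====
def Spec_parse_code_snippet (code_snippet : String) (out : String) : Prop := out = parse_code_snippet_alt code_snippet
instance (code_snippet : String) (out : String) : Decidable (Spec_parse_code_snippet code_snippet out) := by unfold Spec_parse_code_snippet; infer_instance

-- ===== CLAIM (what is proved, stated in full; the proofs are below) =====
def Claim_equal_parse_code_snippet : Prop := ∀ (code_snippet : String), Dom_parse_code_snippet code_snippet → Spec_parse_code_snippet code_snippet (parse_code_snippet code_snippet)

-- ===== LEMMAS AND PROOFS =====

-- Reference split of a string at every '\n' (structural form of splitOn.go with sep ['\n']).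
def pvSplitAux : List Char → List Char → List (List Char)
  | pre, [] => [pre]
  | pre, c :: rest =>
    if c = '\n' then pre :: pvSplitAux [] rest else pvSplitAux (pre ++ [c]) rest

-- Structural form of splitOnMax.go with sep [':', ' '] and maxsplit 1.
def pvSplitMax1Aux : List Char → List Char → List (List Char)
  | pre, [] => [pre]
  | pre, c :: rest =>
    if c = ':' ∧ rest.head? = some ' ' then [pre, rest.tail]
    else pvSplitMax1Aux (pre ++ [c]) rest

-- Per-line cleaning: scan for the first ": "; pre = chars already scanned without finding it.
def pvLineClean : List Char → List Char → List Char
  | pre, [] => pre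
  | pre, c :: rest =>
    if c = ':' ∧ rest.head? = some ' ' then rest.tail
    else pvLineClean (pre ++ [c]) rest

-- pvAltGo without the out accumulator.
def pvBJoin : List Char → Bool → List Char → List Char
  | acc, _, [] => acc
  | acc, stripped, c :: rest =>
    if c = '\n' then acc ++ '\n' :: pvBJoin [] false rest
    else if stripped = false ∧ c = ':' ∧ rest.head? = some ' ' then
      pvBJoin [] true rest.tail
    else pvBJoin (acc ++ [c]) stripped rest
termination_by _ _ s => s.length
decreasing_by all_goals (simp [List.length_tail]; try omega)

-- break a string at its first '\n'
def pvBrk : List Char → List Char × Option (List Char)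
  | [] => ([], none)
  | c :: rest =>
    if c = '\n' then ([], some rest)
    else ((pvBrk rest).1.cons c, (pvBrk rest).2)

-- "this adjacent pair is not ': '"
def pvP (a b : Char) : Prop := ¬(a = ':' ∧ b = ' ')

-- A's whole computation, in reference form.
def pvW (pre s : List Char) : List Char :=
  PySem.Chars.join ['\n'] ((pvSplitAux pre s).map (pvLineClean []))

theorem pvSplitOn_go_eq (fuel : Nat) : ∀ (l cur : List Char) (acc : List (List Char)),
    l.length < fuel →
    PySem.Chars.splitOn.go ['\n'] fuel l cur acc = acc.reverse ++ pvSplitAux cur.reverse l := by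
  induction fuel with
  | zero => intro l cur acc h; omega
  | succ fuel ih =>
    intro l cur acc h
    match l with
    | [] =>
      rw [PySem.Chars.splitOn.go]
      simp [pvSplitAux]
      omega
    | c :: rest =>
      rw [PySem.Chars.splitOn.go]
      by_cases hc : c = '\n'
      · subst hc
        rw [if_pos (by simp [List.isPrefixOf] : (['\n'].isPrefixOf ('\n' :: rest) : Bool) = true)]
        rw [show List.drop ['\n'].length ('\n' :: rest) = rest from rfl]
        rw [ih rest [] (cur.reverse :: acc) (by simpa using Nat.lt_of_succ_lt_succ h)]
        simp [pvSplitAux]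
      · rw [if_neg (by simp [List.isPrefixOf]; exact fun hh => (hc hh.symm).elim)]
        rw [ih rest (c :: cur) acc (by simpa using Nat.lt_of_succ_lt_succ h)]
        simp [pvSplitAux, hc]

theorem pvSplitOnMax_go_zero (fuel : Nat) (l cur : List Char) (acc : List (List Char)) :
    PySem.Chars.splitOnMax.go [':', ' '] fuel 0 l cur acc = acc.reverse ++ [cur.reverse ++ l] := by
  match fuel, l with
  | 0, l => rw [PySem.Chars.splitOnMax.go]; simp
  | fuel + 1, [] => rw [PySem.Chars.splitOnMax.go]; simp; omega
  | fuel + 1, c :: rest => rw [PySem.Chars.splitOnMax.go]; simp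

theorem pvSplitOnMax_go_eq (fuel : Nat) : ∀ (l cur : List Char) (acc : List (List Char)),
    l.length < fuel →
    PySem.Chars.splitOnMax.go [':', ' '] fuel 1 l cur acc = acc.reverse ++ pvSplitMax1Aux cur.reverse l := by
  induction fuel with
  | zero => intro l cur acc h; omega
  | succ fuel ih =>
    intro l cur acc h
    match l with
    | [] =>
      rw [PySem.Chars.splitOnMax.go]
      simp [pvSplitMax1Aux]
      omega
    | c :: rest =>
      rw [PySem.Chars.splitOnMax.go]
      by_cases hc : c = ':' ∧ rest.head? = some ' '
      · obtain ⟨hc1, hc2⟩ := hc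
        subst hc1
        cases rest with
        | nil => simp at hc2
        | cons d rest' =>
          simp only [List.head?_cons, Option.some.injEq] at hc2
          subst hc2
          rw [if_neg (by omega : ¬(1 : Nat) = 0)]
          rw [if_pos (by simp [List.isPrefixOf] : ([':', ' '].isPrefixOf (':' :: ' ' :: rest') : Bool) = true)]
          rw [show List.drop [':', ' '].length (':' :: ' ' :: rest') = rest' from rfl]
          rw [show (1 : Nat) - 1 = 0 from rfl]
          rw [pvSplitOnMax_go_zero]
          simp [pvSplitMax1Aux]
      · have hpre : ([':', ' '].isPrefixOf (c :: rest)) = false := by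
          cases rest with
          | nil => simp [List.isPrefixOf]
          | cons d rest' =>
            simp only [List.isPrefixOf, Bool.and_eq_false_iff]
            simp only [List.head?_cons, Option.some.injEq] at hc
            by_cases h1 : c = ':'
            · subst h1
              right
              simp at hc ⊢
              exact fun hd => (hc hd.symm)
            · left; simp; exact fun hh => (h1 hh.symm).elim
        rw [if_neg (by omega : ¬(1 : Nat) = 0), if_neg (by simp [hpre])]
        rw [ih rest (c :: cur) acc (by simpa using Nat.lt_of_succ_lt_succ h)]
        simp [pvSplitMax1Aux, hc]

theorem pvLast_splitMax1 (l : List Char) : ∀ pre,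
    (PySem.List.pyGet? (pvSplitMax1Aux pre l) (-1)).getD [] = pvLineClean pre l := by
  induction l with
  | nil => intro pre; simp [pvSplitMax1Aux, pvLineClean, PySem.List.pyGet?, PySem.List.pyIdx?]
  | cons c rest ih =>
    intro pre
    by_cases hc : c = ':' ∧ rest.head? = some ' '
    · simp only [pvSplitMax1Aux, pvLineClean, if_pos hc]
      simp [PySem.List.pyGet?, PySem.List.pyIdx?]
    · simp only [pvSplitMax1Aux, pvLineClean, if_neg hc]
      exact ih (pre ++ [c])

theorem pvSplitAux_ne_nil (s : List Char) : ∀ pre, pvSplitAux pre s ≠ [] := by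
  induction s with
  | nil => intro pre; simp [pvSplitAux]
  | cons c rest ih =>
    intro pre
    by_cases hc : c = '\n' <;> simp [pvSplitAux, hc, ih]

theorem pvSplitAux_brk (s : List Char) : ∀ pre,
    pvSplitAux pre s = (pre ++ (pvBrk s).1) ::
      (match (pvBrk s).2 with | none => [] | some r => pvSplitAux [] r) := by
  induction s with
  | nil => intro pre; simp [pvSplitAux, pvBrk]
  | cons c rest ih =>
    intro pre
    by_cases hc : c = '\n'
    · simp [pvSplitAux, pvBrk, hc]
    · simp only [pvSplitAux, pvBrk, if_neg hc]
      rw [ih (pre ++ [c])]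
      simp

theorem pvBJoin_true_brk (s : List Char) : ∀ acc,
    pvBJoin acc true s = acc ++ (pvBrk s).1 ++
      (match (pvBrk s).2 with | none => [] | some r => '\n' :: pvBJoin [] false r) := by
  induction s with
  | nil => intro acc; simp [pvBJoin, pvBrk]
  | cons c rest ih =>
    intro acc
    by_cases hc : c = '\n'
    · simp [pvBJoin, pvBrk, hc]
    · rw [pvBJoin, if_neg hc, if_neg (by simp)]
      rw [pvBrk, if_neg hc]
      rw [ih (acc ++ [c])]
      simp

theorem pvBrk_len (s : List Char) : ∀ r, (pvBrk s).2 = some r → r.length < s.length := by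
  induction s with
  | nil => intro r h; simp [pvBrk] at h
  | cons c rest ih =>
    intro r h
    by_cases hc : c = '\n'
    · simp [pvBrk, hc] at h; subst h; simp
    · simp [pvBrk, hc] at h
      have := ih r h
      simp; omega

theorem pvW_brk (pre s : List Char) :
    pvW pre s = pvLineClean [] (pre ++ (pvBrk s).1) ++
      (match (pvBrk s).2 with | none => [] | some r => '\n' :: pvW [] r) := by
  unfold pvW
  rw [pvSplitAux_brk]
  match h : (pvBrk s).2 with
  | none => simp [PySem.Chars.join_singleton]
  | some r =>
    simp only [List.map_cons]
    match h2 : pvSplitAux [] r, pvSplitAux_ne_nil r [] with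
    | x :: xs, _ =>
      rw [List.map_cons, PySem.Chars.join_cons_cons]
      simp

theorem pvLineClean_noSep (l : List Char) : ∀ q, List.IsChain pvP l → pvLineClean q l = q ++ l := by
  induction l with
  | nil => intro q _; simp [pvLineClean]
  | cons c rest ih =>
    intro q hch
    rw [List.isChain_cons] at hch
    have hc : ¬(c = ':' ∧ rest.head? = some ' ') := by
      rintro ⟨h1, h2⟩
      exact hch.1 ' ' h2 ⟨h1, rfl⟩
    rw [pvLineClean, if_neg hc, ih (q ++ [c]) hch.2]
    simp

theorem pvLineClean_strip (q : List Char) : ∀ p l1, List.IsChain pvP q →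
    pvLineClean p (q ++ ':' :: ' ' :: l1) = l1 := by
  induction q with
  | nil => intro p l1 _; rw [List.nil_append, pvLineClean, if_pos (by simp)]; rfl
  | cons c q' ih =>
    intro p l1 hch
    rw [List.isChain_cons] at hch
    have hc : ¬(c = ':' ∧ (q' ++ ':' :: ' ' :: l1).head? = some ' ') := by
      rintro ⟨h1, h2⟩
      match q', h2 with
      | [], h2 => simp at h2
      | d :: t, h2 =>
        simp at h2
        exact hch.1 d rfl ⟨h1, h2⟩
    rw [List.cons_append, pvLineClean, if_neg hc, ih (p ++ [c]) l1 hch.2]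

theorem pvChain'_append_left {l t : List Char} (h : List.IsChain pvP (l ++ t)) :
    List.IsChain pvP l := (List.isChain_append.mp h).1

-- MAIN: A's reference form = B's reference form
-- (invariant: no ': ' among adjacent pairs of pre ++ first char of s)
theorem pvMain (n : Nat) : ∀ (s pre : List Char), s.length ≤ n →
    List.IsChain pvP (pre ++ s.take 1) → pvW pre s = pvBJoin pre false s := by
  induction n with
  | zero =>
    intro s pre hlen hinv
    match s, hlen with
    | [], _ =>
      rw [pvW_brk]
      simp only [pvBrk]
      rw [pvLineClean_noSep _ _ (by simpa using hinv)]
      simp [pvBJoin]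
  | succ n ih =>
    intro s pre hlen hinv
    match s with
    | [] =>
      rw [pvW_brk]
      simp only [pvBrk]
      rw [pvLineClean_noSep _ _ (by simpa using hinv)]
      simp [pvBJoin]
    | c :: rest =>
      by_cases hnl : c = '\n'
      · subst hnl
        rw [pvW_brk]
        simp only [pvBrk, if_pos rfl]
        have hpre : List.IsChain pvP pre := pvChain'_append_left (by simpa using hinv)
        rw [pvLineClean_noSep _ _ (by simpa using hpre)]
        rw [pvBJoin, if_pos rfl]
        rw [← ih rest [] (by simpa using hlen) (by
          match rest with
          | [] => simp
          | d :: t => simpa [List.take] using List.isChain_singleton (R := pvP) d)]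
        simp
      · by_cases hsep : c = ':' ∧ rest.head? = some ' '
        · obtain ⟨hc1, hc2⟩ := hsep
          subst hc1
          cases rest with
          | nil => simp at hc2
          | cons d rest' =>
            simp only [List.head?_cons, Option.some.injEq] at hc2
            subst hc2
            have hpre : List.IsChain pvP pre :=
              pvChain'_append_left (l := pre) (t := [':']) (by simpa using hinv)
            rw [pvBJoin, if_neg hnl, if_pos (by simp)]
            simp only [List.tail_cons]
            rw [pvBJoin_true_brk]
            rw [pvW_brk]
            simp only [pvBrk, if_neg hnl, if_neg (by simp : ¬(' ' = '\n'))]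
            rw [show pre ++ (':' :: (' ' :: (pvBrk rest').1)) =
                pre ++ ':' :: ' ' :: (pvBrk rest').1 from rfl]
            rw [pvLineClean_strip pre _ _ hpre]
            cases h2 : (pvBrk rest').2 with
            | none => simp
            | some r =>
              have hr : r.length < rest'.length := pvBrk_len rest' r h2
              dsimp only
              rw [ih r [] (by simp at hlen; omega) (by
                match r with
                | [] => simp
                | d :: t => simpa [List.take] using List.isChain_singleton (R := pvP) d)]
              simp
        · rw [pvBJoin, if_neg hnl, if_neg (by simpa using hsep)]
          rw [pvW_brk, pvBrk, if_neg hnl]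
          have hstep : pvW (pre ++ [c]) rest = pvBJoin (pre ++ [c]) false rest := by
            apply ih rest (pre ++ [c]) (by simpa using hlen)
            rw [List.isChain_append]
            refine ⟨pvChain'_append_left (by simpa using hinv), ?_, ?_⟩
            · match rest with
              | [] => simp
              | d :: t =>
                simp only [List.take, List.isChain_singleton]
            · intro x hx y hy
              match rest, hy with
              | d :: t, hy =>
                simp at hx hy
                subst hx; subst hy
                intro h12
                exact hsep ⟨h12.1, by simp [h12.2]⟩
          rw [pvW_brk] at hstep
          simpa using hstep

theorem pvAltGo_bjoin (n : Nat) : ∀ (s acc : List Char) (stripped : Bool) (out : List Char),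
    s.length ≤ n → pvAltGo s acc stripped out = out ++ pvBJoin acc stripped s := by
  induction n with
  | zero =>
    intro s acc stripped out hlen
    match s, hlen with
    | [], _ => rw [pvAltGo, pvBJoin]
  | succ n ih =>
    intro s acc stripped out hlen
    match s with
    | [] => rw [pvAltGo, pvBJoin]
    | c :: rest =>
      by_cases hnl : c = '\n'
      · rw [pvAltGo, pvBJoin, if_pos hnl, if_pos hnl,
          ih rest [] false _ (by simpa using hlen)]
        simp
      · by_cases hsep : stripped = false ∧ c = ':' ∧ rest.head? = some ' '
        · rw [pvAltGo, pvBJoin, if_neg hnl, if_neg hnl, if_pos hsep, if_pos hsep,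
            ih rest.tail [] true out (by
              have : rest.tail.length ≤ rest.length := by
                cases rest <;> simp
              simp at hlen; omega)]
        · rw [pvAltGo, pvBJoin, if_neg hnl, if_neg hnl, if_neg hsep, if_neg hsep,
            ih rest (acc ++ [c]) stripped out (by simpa using hlen)]

-- ===== VERDICT (by name: the statement is the Claim_ definition above) =====
theorem parse_code_snippet_spec : Claim_equal_parse_code_snippet := by
  intro s _
  unfold Spec_parse_code_snippet parse_code_snippet parse_code_snippet_alt
  have hA : PySem.Chars.splitOn s.toList ['\n'] = pvSplitAux [] s.toList := by
    unfold PySem.Chars.splitOn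
    rw [pvSplitOn_go_eq (s.toList.length + 1) s.toList [] [] (by omega)]
    simp
  have hline : ∀ line : List Char,
      (PySem.List.pyGet? (PySem.Chars.splitOnMax line [':', ' '] 1) (-1)).getD [] =
        pvLineClean [] line := by
    intro line
    rw [PySem.Chars.splitOnMax, if_neg (by omega)]
    rw [show ((1 : Int).toNat) = 1 from rfl]
    rw [pvSplitOnMax_go_eq (line.length + 1) line [] [] (by omega)]
    simpa using pvLast_splitMax1 line []
  have hmap : (pvSplitAux [] s.toList).map
      (fun line => (PySem.List.pyGet? (PySem.Chars.splitOnMax line [':', ' '] 1) (-1)).getD []) =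
      (pvSplitAux [] s.toList).map (pvLineClean []) := by
    apply List.map_congr_left; intro line _; exact hline line
  simp only [hA, hmap]
  rw [pvAltGo_bjoin s.toList.length s.toList [] false [] (le_refl _)]
  rw [show PySem.Chars.join ['\n'] ((pvSplitAux [] s.toList).map (pvLineClean [])) = pvW [] s.toList from rfl]
  rw [pvMain s.toList.length s.toList [] (le_refl _) (by
    match s.toList with
    | [] => simp
    | d :: t => simpa [List.take] using List.isChain_singleton (R := pvP) d)]
  simp
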